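-- pv_equiv track=rewrite | github.com/MetamusicX/zeitnetz-generator | netlify-site/zeitnetz_engine.py | duration_as_count_transform
-- ===== SOURCE A (Python) =====
-- def duration_as_count_transform(fam_entries, zn_events):
--     final_entries = {}
--     max_index = 0
--
--     for fn, entries in fam_entries.items():
--         if not entries:
--             final_entries[fn] = []
--             continue
--         start_idx = entries[0]["zn_index"]
--         durations = [e["dur"] for e in entries]
--         new_entries = []
--         idx = start_idx
--         for i in range(len(entries)):
--             if idx >= len(zn_events):
--                 break
--             ev = zn_events[idx]
--             new_entries.append({
--                 "zn_index": idx, "pos": ev["pos"],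
--                 "pc": ev["pc"], "dur": ev["dur"]
--             })
--             max_index = max(max_index, idx)
--             if i < len(entries) - 1:
--                 idx += durations[i]
--                 max_index = max(max_index, idx)
--         final_entries[fn] = new_entries
--
--     return final_entries, max_index
-- ===== SOURCE B (Python) =====
-- def duration_as_count_transform(fam_entries, zn_events):
--     L = len(zn_events)
--     final_entries = {}
--     max_index = 0
--     for fn, entries in fam_entries.items():
--         if not entries:
--             final_entries[fn] = []
--             continue
--         durs = [e["dur"] for e in entries]
--         # prefix sums: one index per entry
--         idxs = [entries[0]["zn_index"]]
--         for d in durs[:-1]: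
--             idxs.append(idxs[-1] + d)
--         n = len(idxs)
--         k = next((i for i, t in enumerate(idxs) if t >= L), n)
--         if k > 0:
--             for t in idxs[:min(k, n - 1) + 1]:
--                 max_index = max(max_index, t)
--         final_entries[fn] = [
--             {"zn_index": t, "pos": zn_events[t]["pos"],
--              "pc": zn_events[t]["pc"], "dur": zn_events[t]["dur"]}
--             for t in idxs[:k]
--         ]
--     return final_entries, max_index
-- ===== Notes on version B (the rewrite author's own statement) =====
-- stated objective: alternative
-- what changed: B replaces A's stateful step-then-record loop with its break by first computing each family's full index sequence as prefix sums of the durations, locating the first out-of-range index, and then building the entries and the running max by a comprehension/max over slices of that sequence.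
import Mathlib
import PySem

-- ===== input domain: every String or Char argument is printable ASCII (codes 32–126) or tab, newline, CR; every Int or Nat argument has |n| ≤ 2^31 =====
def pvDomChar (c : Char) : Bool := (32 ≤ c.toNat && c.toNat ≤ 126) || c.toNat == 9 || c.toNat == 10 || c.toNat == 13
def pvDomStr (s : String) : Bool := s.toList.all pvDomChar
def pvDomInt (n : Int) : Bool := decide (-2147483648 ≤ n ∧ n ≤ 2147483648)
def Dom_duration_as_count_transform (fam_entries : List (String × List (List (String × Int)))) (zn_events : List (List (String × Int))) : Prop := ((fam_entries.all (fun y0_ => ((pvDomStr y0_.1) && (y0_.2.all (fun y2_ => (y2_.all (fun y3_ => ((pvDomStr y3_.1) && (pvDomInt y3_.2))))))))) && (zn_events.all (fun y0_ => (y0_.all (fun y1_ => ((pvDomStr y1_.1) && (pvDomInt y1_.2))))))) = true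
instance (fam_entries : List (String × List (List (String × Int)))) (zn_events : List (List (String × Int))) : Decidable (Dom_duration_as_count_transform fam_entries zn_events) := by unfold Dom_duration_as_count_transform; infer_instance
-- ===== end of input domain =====

-- B precomputes each family's full index sequence as prefix sums of the durations, truncates it at the
-- first out-of-range index, and builds the entries/running max by map/fold over slices of it, instead of
-- A's stateful step-then-record loop with a break; objective: alternative decomposition (no speed claim).

-- shared primitive wrappers: d[k] (KeyError excluded by Pre_) and zn[t] (IndexError excluded by Pre_)
def pvVal (d : List (String × Int)) (k : String) : Int :=
  ((PySem.Dict.mk d).get? k).getD 0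
def pvEvent (zn : List (List (String × Int))) (t : Int) : List (String × Int) :=
  (PySem.List.pyGet? zn t).getD []

-- ===== PORT A =====
-- the inner 'for i in range(len(entries))' loop with its break, step for step
def pvALoop (zn : List (List (String × Int))) (durs : List Int) (n i : Nat) (idx : Int)
    (acc : List (List (String × Int))) (mx : Int) : List (List (String × Int)) × Int :=
  if _h : i < n then
    if (zn.length : Int) ≤ idx then (acc, mx)
    else
      let ev := pvEvent zn idx
      let acc' := acc ++ [[("zn_index", idx), ("pos", pvVal ev "pos"),
                          ("pc", pvVal ev "pc"), ("dur", pvVal ev "dur")]]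
      let mx1 := max mx idx
      if i < n - 1 then
        let idx' := idx + (PySem.List.pyGet? durs (i : Int)).getD 0
        pvALoop zn durs n (i + 1) idx' acc' (max mx1 idx')
      else
        pvALoop zn durs n (i + 1) idx acc' mx1
  else (acc, mx)
termination_by n - i

def duration_as_count_transform (fam_entries : List (String × List (List (String × Int)))) (zn_events : List (List (String × Int))) : (List (String × List (List (String × Int)))) × Int :=
  let st := fam_entries.foldl
    (fun (st : PySem.Dict String (List (List (String × Int))) × Int) p =>
      match p.2 with
      | [] => (st.1.insert p.1 [], st.2)
      | e0 :: _ =>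
        let start := pvVal e0 "zn_index"
        let durs := p.2.map (fun e => pvVal e "dur")
        let r := pvALoop zn_events durs p.2.length 0 start [] st.2
        (st.1.insert p.1 r.1, r.2))
    (PySem.Dict.empty, 0)
  (st.1.items, st.2)

-- ===== PORT B =====
def duration_as_count_transform_alt (fam_entries : List (String × List (List (String × Int)))) (zn_events : List (List (String × Int))) : (List (String × List (List (String × Int)))) × Int :=
  let L : Int := zn_events.length
  let st := fam_entries.foldl
    (fun (st : PySem.Dict String (List (List (String × Int))) × Int) p =>
      match p.2 with
      | [] => (st.1.insert p.1 [], st.2)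
      | e0 :: _ =>
        let durs := p.2.map (fun e => pvVal e "dur")
        -- idxs = [entries[0]["zn_index"]]; for d in durs[:-1]: idxs.append(idxs[-1] + d)
        let idxs := durs.dropLast.foldl
          (fun l d => l ++ [(PySem.List.pyGet? l (-1)).getD 0 + d]) [pvVal e0 "zn_index"]
        let n := idxs.length
        let k := idxs.findIdx (fun t => decide (L ≤ t))
        let mx := if 0 < k then (idxs.take (min k (n - 1) + 1)).foldl max st.2 else st.2
        let ents := (idxs.take k).map (fun t =>
          [("zn_index", t), ("pos", pvVal (pvEvent zn_events t) "pos"),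
           ("pc", pvVal (pvEvent zn_events t) "pc"), ("dur", pvVal (pvEvent zn_events t) "dur")])
        (st.1.insert p.1 ents, mx))
    (PySem.Dict.empty, 0)
  (st.1.items, st.2)

-- ===== PRECONDITION & SPEC =====
def pvHasKey (d : List (String × Int)) (k : String) : Bool := d.any (fun p => p.1 == k)

-- closed form for the indices a family visits: prefix sums (accumulate) of the durations,
-- truncated at the first index ≥ len(zn_events)
def pvFamOK (zn : List (List (String × Int))) (entries : List (List (String × Int))) : Bool :=
  match entries with
  | [] => true
  | e0 :: _ =>
    entries.all (fun e => pvHasKey e "dur") &&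
    pvHasKey e0 "zn_index" &&
    ((List.scanl (· + ·) (pvVal e0 "zn_index")
        ((entries.map (fun e => pvVal e "dur")).dropLast)).takeWhile
          (fun t => decide (t < (zn.length : Int)))).all
      (fun t => decide (-(zn.length : Int) ≤ t) && pvHasKey (pvEvent zn t) "pos" &&
                pvHasKey (pvEvent zn t) "pc" && pvHasKey (pvEvent zn t) "dur")

-- Pre_ excludes exactly the inputs where the Python A raises (KeyError on a missing
-- "zn_index"/"dur"/"pos"/"pc" key, or IndexError when a visited index is below -len(zn_events)).
def Pre_duration_as_count_transform (fam_entries : List (String × List (List (String × Int)))) (zn_events : List (List (String × Int))) : Prop :=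
  ∀ p ∈ fam_entries, pvFamOK zn_events p.2 = true
instance (fam_entries : List (String × List (List (String × Int)))) (zn_events : List (List (String × Int))) : Decidable (Pre_duration_as_count_transform fam_entries zn_events) := by unfold Pre_duration_as_count_transform; infer_instance

def pvWitness_duration_as_count_transform : (List (String × List (List (String × Int)))) × (List (List (String × Int))) :=
  ([("f", [[("zn_index", 0), ("dur", 1)], [("dur", 3)]])],
   [[("pos", 0), ("pc", 1), ("dur", 2)], [("pos", 3), ("pc", 4), ("dur", 5)]])

def Spec_duration_as_count_transform (fam_entries : List (String × List (List (String × Int)))) (zn_events : List (List (String × Int))) (out : (List (String × List (List (String × Int)))) × Int) : Prop := out = duration_as_count_transform_alt fam_entries zn_events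
instance (fam_entries : List (String × List (List (String × Int)))) (zn_events : List (List (String × Int))) (out : (List (String × List (List (String × Int)))) × Int) : Decidable (Spec_duration_as_count_transform fam_entries zn_events out) := by unfold Spec_duration_as_count_transform; infer_instance

-- ===== CLAIM (what is proved, stated in full; the proofs are below) =====
def Claim_equal_duration_as_count_transform : Prop := ∀ (fam_entries : List (String × List (List (String × Int)))) (zn_events : List (List (String × Int))), Dom_duration_as_count_transform fam_entries zn_events → Pre_duration_as_count_transform fam_entries zn_events → Spec_duration_as_count_transform fam_entries zn_events (duration_as_count_transform fam_entries zn_events)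

-- ===== LEMMAS AND PROOFS =====

def pvEnt (zn : List (List (String × Int))) (t : Int) : List (String × Int) :=
  [("zn_index", t), ("pos", pvVal (pvEvent zn t) "pos"),
   ("pc", pvVal (pvEvent zn t) "pc"), ("dur", pvVal (pvEvent zn t) "dur")]

-- structural model of A's inner loop over the still-to-be-added durations
def pvModel (zn : List (List (String × Int))) : List Int → Int → List (List (String × Int)) → Int → List (List (String × Int)) × Int
  | [], _, acc, mx => (acc, mx)
  | d :: rest, idx, acc, mx =>
    if (zn.length : Int) ≤ idx then (acc, mx)
    else
      match rest with
      | [] => (acc ++ [pvEnt zn idx], max mx idx)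
      | _ :: _ => pvModel zn rest (idx + d) (acc ++ [pvEnt zn idx]) (max (max mx idx) (idx + d))

lemma pvALoop_eq_model (zn : List (List (String × Int))) (durs : List Int) :
    ∀ (j i : Nat) (idx : Int) (acc : List (List (String × Int))) (mx : Int),
      durs.length - i = j →
      pvALoop zn durs durs.length i idx acc mx = pvModel zn (durs.drop i) idx acc mx := by
  intro j
  induction j with
  | zero =>
    intro i idx acc mx h
    have hni : ¬ i < durs.length := by omega
    rw [pvALoop, List.drop_eq_nil_of_le (by omega)]
    simp [hni, pvModel]
  | succ j ih =>
    intro i idx acc mx h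
    have hi : i < durs.length := by omega
    have hdrop : durs.drop i = durs[i] :: durs.drop (i + 1) := by
      rw [List.drop_eq_getElem_cons hi]
    rw [pvALoop, hdrop]
    simp only [dif_pos hi]
    by_cases hb : (zn.length : Int) ≤ idx
    · simp [pvModel, hb]
    · simp only [if_neg hb]
      have hget : (PySem.List.pyGet? durs (i : Int)).getD 0 = durs[i] := by
        simp [PySem.List.pyGet?_natCast, List.getElem?_eq_getElem hi]
      by_cases hlast : i < durs.length - 1
      · have hd2 : durs.drop (i + 1) = durs[i + 1] :: durs.drop (i + 2) := by
          rw [List.drop_eq_getElem_cons (by omega)]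
        rw [if_pos hlast, hget, ih (i + 1) (idx + durs[i]) _ _ (by omega), hd2]
        simp [pvModel, hb, pvEnt]
      · rw [if_neg hlast, ih (i + 1) idx _ _ (by omega)]
        have : durs.drop (i + 1) = [] := List.drop_eq_nil_of_le (by omega)
        rw [this]
        simp [pvModel, hb, pvEnt]

lemma pvModel_eq (zn : List (List (String × Int))) :
    ∀ (ds : List Int) (idx : Int) (acc : List (List (String × Int))) (mx : Int), ds ≠ [] →
      pvModel zn ds idx acc mx =
        (let idxs := List.scanl (· + ·) idx ds.dropLast
         let k := idxs.findIdx (fun t => decide ((zn.length : Int) ≤ t))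
         (acc ++ (idxs.take k).map (pvEnt zn),
          if 0 < k then (idxs.take (min k (idxs.length - 1) + 1)).foldl max mx else mx)) := by
  intro ds
  induction ds with
  | nil => intro _ _ _ h; exact absurd rfl h
  | cons d rest ih =>
    intro idx acc mx _
    by_cases hb : (zn.length : Int) ≤ idx
    · cases rest <;> simp [pvModel, hb, List.findIdx_cons]
    · cases rest with
      | nil =>
        simp [pvModel, hb, List.findIdx_cons, List.scanl]
      | cons r rest' =>
        have hne : r :: rest' ≠ [] := by simp
        rw [pvModel]
        rw [if_neg hb]
        rw [ih (idx + d) (acc ++ [pvEnt zn idx]) (max (max mx idx) (idx + d)) hne]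
        obtain ⟨t, ht⟩ : ∃ t, List.scanl (· + ·) (idx + d) ((r :: rest').dropLast) = (idx + d) :: t := by
          cases hys : (r :: rest').dropLast with
          | nil => exact ⟨[], by simp [List.scanl]⟩
          | cons y ys => exact ⟨List.scanl (· + ·) (idx + d + y) ys, by simp [List.scanl]⟩
        simp only [List.dropLast_cons_of_ne_nil hne, List.scanl_cons, ht]
        have hd : decide ((zn.length : Int) ≤ idx) = false := by simp [hb]
        set k' := List.findIdx (fun t => decide ((zn.length : Int) ≤ t)) ((idx + d) :: t) with hk'
        have hfi : List.findIdx (fun t => decide ((zn.length : Int) ≤ t)) (idx :: (idx + d) :: t) = k' + 1 := by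
          rw [List.findIdx_cons, hd]; rfl
        rw [hfi]
        simp only [Prod.mk.injEq]
        refine ⟨by simp [List.take_succ_cons], ?_⟩
        rw [if_pos (Nat.succ_pos k')]
        by_cases hk : k' = 0
        · rw [hk]
          simp only [if_neg (by omega : ¬ (0:Nat) < 0), List.length_cons]
          rw [show min (0 + 1) (t.length + 1 + 1 - 1) + 1 = 2 from by omega]
          simp [List.take_succ_cons, List.foldl_cons]
        · have hk0 : 0 < k' := Nat.pos_of_ne_zero hk
          rw [if_pos hk0]
          simp only [List.length_cons]
          rw [show min (k' + 1) (t.length + 1 + 1 - 1) + 1 = min k' t.length + 2 from by omega,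
              show min k' (t.length + 1 - 1) + 1 = min k' t.length + 1 from by omega]
          simp only [List.take_succ_cons, List.foldl_cons]
          rw [max_eq_left (le_max_right (max mx idx) (idx + d))]

lemma pvIdxsFold (ds : List Int) :
    ∀ (a : Int) (init : List Int),
      ds.foldl (fun l d => l ++ [(PySem.List.pyGet? l (-1)).getD 0 + d]) (init ++ [a]) =
        init ++ List.scanl (· + ·) a ds := by
  induction ds with
  | nil => intro a init; simp [List.scanl]
  | cons d ds ih =>
    intro a init
    rw [List.foldl_cons]
    simp only [PySem.List.pyGet?_neg_one_append_singleton, Option.getD_some, List.append_assoc]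
    rw [show init ++ ([a] ++ [a + d]) = (init ++ [a]) ++ [a + d] by simp]
    rw [ih (a + d) (init ++ [a])]
    simp [List.scanl]

lemma pvStep_eq (zn : List (List (String × Int)))
    (st : PySem.Dict String (List (List (String × Int))) × Int)
    (p : String × List (List (String × Int))) :
    (match p.2 with
     | [] => (st.1.insert p.1 [], st.2)
     | e0 :: _ =>
       let start := pvVal e0 "zn_index"
       let durs := p.2.map (fun e => pvVal e "dur")
       let r := pvALoop zn durs p.2.length 0 start [] st.2
       (st.1.insert p.1 r.1, r.2)) =
    (match p.2 with
     | [] => (st.1.insert p.1 [], st.2)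
     | e0 :: _ =>
       let durs := p.2.map (fun e => pvVal e "dur")
       let idxs := durs.dropLast.foldl
         (fun l d => l ++ [(PySem.List.pyGet? l (-1)).getD 0 + d]) [pvVal e0 "zn_index"]
       let n := idxs.length
       let k := idxs.findIdx (fun t => decide ((zn.length : Int) ≤ t))
       let mx := if 0 < k then (idxs.take (min k (n - 1) + 1)).foldl max st.2 else st.2
       let ents := (idxs.take k).map (fun t =>
         [("zn_index", t), ("pos", pvVal (pvEvent zn t) "pos"),
          ("pc", pvVal (pvEvent zn t) "pc"), ("dur", pvVal (pvEvent zn t) "dur")])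
       (st.1.insert p.1 ents, mx)) := by
  obtain ⟨fn, entries⟩ := p
  cases entries with
  | nil => rfl
  | cons e0 rest =>
    simp only []
    set durs := ((e0 :: rest).map (fun e => pvVal e "dur")) with hdurs
    have hA := pvALoop_eq_model zn durs durs.length 0 (pvVal e0 "zn_index") [] st.2 rfl
    simp only [List.drop_zero] at hA
    rw [show (e0 :: rest).length = durs.length from by simp [hdurs]]
    rw [hA, pvModel_eq zn durs _ _ _ (by simp [hdurs])]
    have hB := pvIdxsFold durs.dropLast (pvVal e0 "zn_index") []
    simp only [List.nil_append] at hB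
    rw [hB]
    simp [show pvEnt zn = fun t =>
      ([("zn_index", t), ("pos", pvVal (pvEvent zn t) "pos"),
        ("pc", pvVal (pvEvent zn t) "pc"), ("dur", pvVal (pvEvent zn t) "dur")] :
        List (String × Int)) from rfl]

-- ===== VERDICT (by name: the statement is the Claim_ definition above) =====
theorem duration_as_count_transform_spec : Claim_equal_duration_as_count_transform := by
  unfold Claim_equal_duration_as_count_transform
  intro fam zn _ _
  unfold Spec_duration_as_count_transform
  unfold duration_as_count_transform duration_as_count_transform_alt
  have h :
      fam.foldl
        (fun (st : PySem.Dict String (List (List (String × Int))) × Int) p =>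
          match p.2 with
          | [] => (st.1.insert p.1 [], st.2)
          | e0 :: _ =>
            let start := pvVal e0 "zn_index"
            let durs := p.2.map (fun e => pvVal e "dur")
            let r := pvALoop zn durs p.2.length 0 start [] st.2
            (st.1.insert p.1 r.1, r.2))
        (PySem.Dict.empty, 0) =
      fam.foldl
        (fun (st : PySem.Dict String (List (List (String × Int))) × Int) p =>
          match p.2 with
          | [] => (st.1.insert p.1 [], st.2)
          | e0 :: _ =>
            let durs := p.2.map (fun e => pvVal e "dur")
            let idxs := durs.dropLast.foldl
              (fun l d => l ++ [(PySem.List.pyGet? l (-1)).getD 0 + d]) [pvVal e0 "zn_index"]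
            let n := idxs.length
            let k := idxs.findIdx (fun t => decide ((zn.length : Int) ≤ t))
            let mx := if 0 < k then (idxs.take (min k (n - 1) + 1)).foldl max st.2 else st.2
            let ents := (idxs.take k).map (fun t =>
              [("zn_index", t), ("pos", pvVal (pvEvent zn t) "pos"),
               ("pc", pvVal (pvEvent zn t) "pc"), ("dur", pvVal (pvEvent zn t) "dur")])
            (st.1.insert p.1 ents, mx))
        (PySem.Dict.empty, 0) :=
    PySem.List.foldl_congr_mem _ _ _ _ (fun acc x _ => pvStep_eq zn acc x)
  exact congrArg
    (fun s : PySem.Dict String (List (List (String × Int))) × Int => (s.1.items, s.2)) h
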